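-- pv_equiv track=rewrite | github.com/quocthang0507/PythonExercises | Chapter 1/Ex76.py | KT_1
-- ===== SOURCE A (Python) =====
-- def KT_1(n):
--     t = 1
--     for i in range(1, n):
--         t *= 3
--         if t == n:
--             return i
--         elif t > n:
--             return -1
-- ===== SOURCE B (Python) =====
-- def KT_1(n):
--     if n <= 1:
--         return None
--     m, count = n, 0
--     while m % 3 == 0:
--         m //= 3
--         count += 1
--     return count if m == 1 else -1
-- ===== Notes on version B (the rewrite author's own statement) =====
-- stated objective: simpler
-- what changed: B divides factors of 3 out of n downward (while m % 3 == 0: m //= 3) and checks the residue, instead of A's upward loop multiplying a running power of 3 and comparing it against n at every range(1, n) step.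
import Mathlib
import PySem

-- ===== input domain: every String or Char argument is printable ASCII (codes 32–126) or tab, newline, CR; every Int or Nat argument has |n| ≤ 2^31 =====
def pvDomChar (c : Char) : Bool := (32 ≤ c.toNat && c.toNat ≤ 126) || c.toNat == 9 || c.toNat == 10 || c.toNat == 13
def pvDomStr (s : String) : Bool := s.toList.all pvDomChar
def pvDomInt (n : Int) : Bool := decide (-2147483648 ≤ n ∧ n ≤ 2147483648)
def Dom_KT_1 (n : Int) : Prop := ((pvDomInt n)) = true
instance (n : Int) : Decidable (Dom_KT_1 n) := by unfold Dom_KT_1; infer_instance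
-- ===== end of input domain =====

-- B rewrites A's upward power-building loop as downward division by 3 (simpler); same return value everywhere.

-- ===== PORT A =====
-- for i in range(1, n): t *= 3; if t == n: return i; elif t > n: return -1
def KT_1_loop : List Int → Int → Int → Option Int
  | [], _, _ => none
  | i :: rest, t, n =>
    let t' := t * 3
    if t' = n then some i
    else if t' > n then some (-1)
    else KT_1_loop rest t' n

def KT_1 (n : Int) : Option Int :=
  KT_1_loop (PySem.List.pyRange 1 n 1) 1 n

-- ===== PORT B =====
-- while m % 3 == 0: m //= 3; count += 1   (the 0 < m guard only makes the
-- recursion total; B's loop is reached only with m = n ≥ 2, where it is vacuous)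
def KT_1_divloop (m count : Int) : Int × Int :=
  if h : PySem.Int.mod m 3 = 0 ∧ 0 < m then
    KT_1_divloop (PySem.Int.floordiv m 3) (count + 1)
  else (m, count)
termination_by m.toNat
decreasing_by
  have h3 : (3:Int) ∣ m := (PySem.Int.mod_eq_zero_iff_dvd m 3).1 h.1
  have hm := h.2
  rw [PySem.Int.floordiv_eq_ediv_of_pos (by norm_num : (0:Int) < 3)]
  obtain ⟨q, rfl⟩ := h3
  have _hq : 0 < q := by nlinarith
  have h33 : 3 * q / 3 = q := by omega
  rw [h33]; omega

def KT_1_alt (n : Int) : Option Int :=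
  if n ≤ 1 then none
  else
    let p := KT_1_divloop n 0
    if p.1 = 1 then some p.2 else some (-1)

-- ===== PRECONDITION & SPEC =====
def Spec_KT_1 (n : Int) (out : Option Int) : Prop := out = KT_1_alt n
instance (n : Int) (out : Option Int) : Decidable (Spec_KT_1 n out) := by unfold Spec_KT_1; infer_instance

-- ===== CLAIM (what is proved, stated in full; the proofs are below) =====
def Claim_equal_KT_1 : Prop := ∀ (n : Int), Dom_KT_1 n → Spec_KT_1 n (KT_1 n)

-- ===== LEMMAS AND PROOFS =====

theorem pow3_gt (j : Nat) : (j:Int) + 1 ≤ 3 ^ j := by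
  induction j with
  | zero => norm_num
  | succ k ih => push_cast; rw [pow_succ]; push_cast at ih; nlinarith

theorem divloop_spec : ∀ (k : Nat) (m c : Int), m.toNat = k → 0 < m →
    ∃ (v : Nat) (m' : Int), KT_1_divloop m c = (m', c + v) ∧ m = 3 ^ v * m' ∧
      ¬ (3:Int) ∣ m' ∧ 0 < m' := by
  intro k
  induction k using Nat.strong_induction_on with
  | _ k ih =>
    intro m c hk hm
    rw [KT_1_divloop]
    by_cases h : PySem.Int.mod m 3 = 0 ∧ 0 < m
    · rw [dif_pos h]
      have h3 : (3:Int) ∣ m := (PySem.Int.mod_eq_zero_iff_dvd m 3).1 h.1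
      obtain ⟨q, rfl⟩ := h3
      have hq : 0 < q := by nlinarith
      have hfd : PySem.Int.floordiv (3 * q) 3 = q := by
        rw [PySem.Int.floordiv_eq_ediv_of_pos (by norm_num : (0:Int) < 3)]; omega
      have hlt : q.toNat < k := by omega
      obtain ⟨v, m', heq, hfact, hnd, hm'⟩ := ih q.toNat hlt q (c + 1) rfl hq
      refine ⟨v + 1, m', ?_, ?_, hnd, hm'⟩
      · rw [hfd, heq]; congr 1; push_cast; ring
      · rw [pow_succ]; nlinarith [hfact]
    · rw [dif_neg h]
      have hnd : ¬ (3:Int) ∣ m := by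
        intro hd
        exact h ⟨(PySem.Int.mod_eq_zero_iff_dvd m 3).2 hd, hm⟩
      exact ⟨0, m, by simp, by simp, hnd, hm⟩

theorem loopA_pow : ∀ (k j : Nat) (n : Int), n = 3 ^ (j + k + 1) →
    KT_1_loop (PySem.List.pyRange ((j:Int) + 1) n 1) (3 ^ j) n
      = some ((j:Int) + (k:Int) + 1) := by
  intro k
  induction k with
  | zero =>
    intro j n hn
    have hn' : n = 3 ^ (j + 1) := by simp [hn]
    have hb := pow3_gt (j + 1)
    have hlt : (j:Int) + 1 < n := by rw [hn']; push_cast at hb; omega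
    rw [PySem.List.pyRange_one_cons hlt]
    simp only [KT_1_loop]
    rw [if_pos (by rw [hn', pow_succ])]
    norm_num
  | succ k ih =>
    intro j n hn
    have hb := pow3_gt (j + 1)
    have h2 : (3:Int) ^ (j + 1) ≤ 3 ^ (j + (k + 1) + 1) :=
      pow_le_pow_right₀ (by norm_num) (by omega)
    have hlt : (j:Int) + 1 < n := by rw [hn]; push_cast at hb; omega
    rw [PySem.List.pyRange_one_cons hlt]
    simp only [KT_1_loop]
    have ht' : (3:Int) ^ j * 3 = 3 ^ (j + 1) := by rw [pow_succ]
    have hstep : (3:Int) ^ (j + 1) < n := by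
      rw [hn]; exact pow_lt_pow_right₀ (by norm_num) (by omega)
    rw [ht']
    rw [if_neg (ne_of_lt hstep), if_neg (not_lt.2 (le_of_lt hstep))]
    have hrec := ih (j + 1) n (by rw [hn]; congr 1; omega)
    push_cast at hrec ⊢
    rw [show (j:Int) + 1 + 1 = (j + 1) + 1 by ring, hrec]
    congr 1; ring

theorem loopA_npow : ∀ (k j : Nat) (n : Int), (3:Int) ^ j < n → n < 3 ^ (j + k + 1) →
    (∀ m : Nat, n ≠ 3 ^ m) →
    KT_1_loop (PySem.List.pyRange ((j:Int) + 1) n 1) (3 ^ j) n = some (-1) := by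
  intro k
  induction k with
  | zero =>
    intro j n hlo hhi hnp
    have hlt : (j:Int) + 1 < n := by have := pow3_gt j; omega
    rw [PySem.List.pyRange_one_cons hlt]
    simp only [KT_1_loop]
    have ht' : (3:Int) ^ j * 3 = 3 ^ (j + 1) := by rw [pow_succ]
    rw [ht']
    rw [if_neg (fun hcon => hnp (j + 1) hcon.symm), if_pos (by simpa using hhi)]
  | succ k ih =>
    intro j n hlo hhi hnp
    have hlt : (j:Int) + 1 < n := by have := pow3_gt j; omega
    rw [PySem.List.pyRange_one_cons hlt]
    simp only [KT_1_loop]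
    have ht' : (3:Int) ^ j * 3 = 3 ^ (j + 1) := by rw [pow_succ]
    rw [ht']
    rw [if_neg (fun hcon => hnp (j + 1) hcon.symm)]
    by_cases hgt : (3:Int) ^ (j + 1) > n
    · rw [if_pos hgt]
    · rw [if_neg hgt]
      have hlo' : (3:Int) ^ (j + 1) < n :=
        lt_of_le_of_ne (not_lt.1 hgt) (fun hcon => hnp (j + 1) hcon.symm)
      have hhi' : n < 3 ^ (j + 1 + k + 1) := by
        rw [show j + 1 + k + 1 = j + (k + 1) + 1 from by omega]; exact hhi
      have hrec := ih (j + 1) n hlo' hhi' hnp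
      push_cast at hrec ⊢
      rw [show (j:Int) + 1 + 1 = (j + 1) + 1 by ring]
      exact hrec

-- ===== VERDICT (by name: the statement is the Claim_ definition above) =====
theorem KT_1_spec : Claim_equal_KT_1 := by
  intro n _
  unfold Spec_KT_1 KT_1 KT_1_alt
  by_cases hn : n ≤ 1
  · rw [PySem.List.pyRange_one_eq_nil (by omega), if_pos hn]; rfl
  · push_neg at hn
    rw [if_neg (by omega)]
    obtain ⟨v, m', heq, hfact, hnd, hm'⟩ :=
      divloop_spec n.toNat n 0 rfl (by omega)
    by_cases hp : ∃ kk : Nat, n = (3:Int) ^ kk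
    · obtain ⟨kk, hkk⟩ := hp
      have hkk1 : 1 ≤ kk := by
        by_contra h
        interval_cases kk
        simp at hkk; omega
      have hvle : v ≤ kk := by
        by_contra h
        push_neg at h
        have : (3:Int) ^ kk < 3 ^ v := pow_lt_pow_right₀ (by norm_num) h
        nlinarith [hfact, hkk, hm']
      have hm'eq : m' = 3 ^ (kk - v) := by
        have h1 : (3:Int) ^ v * m' = 3 ^ v * 3 ^ (kk - v) := by
          rw [← pow_add, show v + (kk - v) = kk by omega, ← hkk, ← hfact]
        exact mul_left_cancel₀ (by positivity) h1
      have hvkk : v = kk := by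
        by_contra h
        have h1 : 1 ≤ kk - v := by omega
        exact hnd (hm'eq ▸ dvd_pow_self (3:Int) (by omega))
      have hm'1 : m' = 1 := by rw [hm'eq, hvkk]; simp
      have hA := loopA_pow (kk - 1) 0 n (by rw [hkk]; congr 1; omega)
      norm_num at hA
      rw [hA]
      simp only [heq]
      norm_num [hm'1]
      omega
    · push_neg at hp
      have hm'ne1 : m' ≠ 1 := by
        intro h1
        exact hp v (by rw [hfact, h1, mul_one])
      have hA := loopA_npow n.toNat 0 n (by simpa using hn)
        (by
          have h1 := pow3_gt n.toNat
          have h2 : (3:Int) ^ n.toNat ≤ 3 ^ (0 + n.toNat + 1) :=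
            pow_le_pow_right₀ (by norm_num) (by omega)
          omega)
        (fun m hm => hp m hm)
      norm_num at hA
      rw [hA]
      simp only [heq]
      norm_num [hm'ne1]
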